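-- pv_equiv track=rewrite | github.com/jonathantsang/CompetitiveProgramming | codeforces/contest639/c/c.py | solve
-- ===== SOURCE A (Python) =====
-- def solve(n, arr):
-- 	rooms = set() # room #
-- 	for i, v in enumerate(arr):
-- 		newroom = i + arr[i % n]
-- 		if newroom in rooms:
-- 			return "NO"
-- 		rooms.add(newroom)
-- 	return "YES"
-- ===== SOURCE B (Python) =====
-- def solve(n, arr):
--     vals = [i + arr[i % n] for i in range(len(arr))]
--     vals.sort()
--     for a, b in zip(vals, vals[1:]):
--         if a == b:
--             return "NO"
--     return "YES"
-- ===== Notes on version B (the rewrite author's own statement) =====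
-- stated objective: alternative
-- what changed: Replaces the incremental hash-set collision check with building the full list of room values, sorting it, and scanning adjacent elements for an equal pair.
import Mathlib
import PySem

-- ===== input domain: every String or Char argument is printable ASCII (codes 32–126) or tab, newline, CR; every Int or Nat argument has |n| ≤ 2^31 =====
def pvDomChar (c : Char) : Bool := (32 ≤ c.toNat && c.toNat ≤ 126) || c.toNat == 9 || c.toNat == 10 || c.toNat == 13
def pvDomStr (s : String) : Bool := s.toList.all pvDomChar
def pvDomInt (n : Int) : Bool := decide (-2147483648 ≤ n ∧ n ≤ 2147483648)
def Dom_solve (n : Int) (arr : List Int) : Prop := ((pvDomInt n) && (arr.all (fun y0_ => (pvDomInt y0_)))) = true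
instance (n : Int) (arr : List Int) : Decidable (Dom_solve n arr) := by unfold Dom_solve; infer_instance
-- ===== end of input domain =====

-- B replaces A's incremental set-membership collision check by building all room values,
-- sorting them and scanning adjacent elements for an equal pair (objective: alternative).

-- ===== PORT A =====
-- loop 'for i, v in enumerate(arr)' with the running set of rooms
def solveGo (n : Int) (arr : List Int) : List (Int × Int) → PySem.Set Int → String
  | [], _ => "YES"
  | (i, _v) :: rest, rooms =>
      let newroom := i + PySem.List.pyGetD arr (PySem.Int.mod i n) 0
      if PySem.Set.contains rooms newroom then "NO"
      else solveGo n arr rest (PySem.Set.add rooms newroom)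

def solve (n : Int) (arr : List Int) : String :=
  solveGo n arr (PySem.List.enumerate arr) PySem.Set.empty

-- ===== PORT B =====
-- 'for a, b in zip(vals, vals[1:]): if a == b: return "NO"'
def hasAdjDup : List Int → Bool
  | [] => false
  | [_] => false
  | a :: b :: t => a == b || hasAdjDup (b :: t)

def solve_alt (n : Int) (arr : List Int) : String :=
  let vals := (PySem.List.pyRange 0 (PySem.List.len arr) 1).map
      (fun i => i + PySem.List.pyGetD arr (PySem.Int.mod i n) 0)
  let s := PySem.List.sorted vals (fun x => x) false
  if hasAdjDup s then "NO" else "YES"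

-- ===== PRECONDITION & SPEC =====
-- Pre_ excludes exactly the inputs where Python A raises: ZeroDivisionError (n = 0 with
-- arr nonempty) and IndexError (arr[i % n] out of range, which for len(arr) ≥ 2 happens
-- iff n < -(len(arr) + 1)); A returns a value on every input admitted here.
def Pre_solve (n : Int) (arr : List Int) : Prop :=
  arr = [] ∨ (n ≠ 0 ∧ (arr.length = 1 ∨ -n ≤ (arr.length : Int) + 1))
instance (n : Int) (arr : List Int) : Decidable (Pre_solve n arr) := by
  unfold Pre_solve; infer_instance
def pvWitness_solve : Int × List Int := (3, [1, 2, 3])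

def Spec_solve (n : Int) (arr : List Int) (out : String) : Prop := out = solve_alt n arr
instance (n : Int) (arr : List Int) (out : String) : Decidable (Spec_solve n arr out) := by
  unfold Spec_solve; infer_instance

-- ===== CLAIM (what is proved, stated in full; the proofs are below) =====
def Claim_equal_solve : Prop :=
  ∀ (n : Int) (arr : List Int), Dom_solve n arr → Pre_solve n arr →
    Spec_solve n arr (solve n arr)

-- ===== LEMMAS AND PROOFS =====

-- the room values A computes along a suffix of the enumerate loop
def roomsOf (n : Int) (arr : List Int) (l : List (Int × Int)) : List Int :=
  l.map (fun p => p.1 + PySem.List.pyGetD arr (PySem.Int.mod p.1 n) 0)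

-- A's loop returns "YES" iff the computed rooms are distinct and miss the accumulated set
lemma solveGo_eq (n : Int) (arr : List Int) (l : List (Int × Int)) (rooms : PySem.Set Int) :
    solveGo n arr l rooms =
      if (roomsOf n arr l).Nodup ∧ (∀ x ∈ roomsOf n arr l, x ∉ rooms)
      then "YES" else "NO" := by
  induction l generalizing rooms with
  | nil => simp [solveGo, roomsOf]
  | cons p rest ih =>
    obtain ⟨i, v⟩ := p
    simp only [solveGo]
    set r := i + PySem.List.pyGetD arr (PySem.Int.mod i n) 0 with hr
    have hcons : roomsOf n arr ((i, v) :: rest) = r :: roomsOf n arr rest := rfl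
    by_cases hmem : r ∈ rooms
    · rw [if_pos (by simpa [PySem.Set.contains_iff] using hmem)]
      rw [if_neg]
      rintro ⟨-, hall⟩
      exact hall r (by rw [hcons]; exact List.mem_cons_self ..) hmem
    · rw [if_neg (by simpa [PySem.Set.contains_iff] using hmem)]
      rw [ih]
      have key : ((roomsOf n arr rest).Nodup ∧
            ∀ x ∈ roomsOf n arr rest, x ∉ PySem.Set.add rooms r) ↔
          ((roomsOf n arr ((i, v) :: rest)).Nodup ∧
            ∀ x ∈ roomsOf n arr ((i, v) :: rest), x ∉ rooms) := by
        rw [hcons]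
        constructor
        · rintro ⟨hnd, hall⟩
          refine ⟨List.nodup_cons.2 ⟨fun hrmem =>
            hall r hrmem ((PySem.Set.mem_add _ _ _).2 (Or.inr rfl)), hnd⟩, ?_⟩
          intro x hx
          rcases List.mem_cons.1 hx with h | h
          · subst h; exact hmem
          · intro hxr
            exact hall x h ((PySem.Set.mem_add _ _ _).2 (Or.inl hxr))
        · rintro ⟨hnd, hall⟩
          rw [List.nodup_cons] at hnd
          refine ⟨hnd.2, fun x hx hxmem => ?_⟩
          rcases (PySem.Set.mem_add _ _ _).1 hxmem with h | h
          · exact hall x (List.mem_cons_of_mem _ hx) h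
          · exact hnd.1 (h ▸ hx)
      exact if_congr key rfl rfl

-- on a (≤)-sorted list, no adjacent equal pair is exactly Nodup
lemma hasAdjDup_eq_false_iff_nodup (l : List Int) (hs : l.Pairwise (· ≤ ·)) :
    hasAdjDup l = false ↔ l.Nodup := by
  induction l with
  | nil => simp [hasAdjDup]
  | cons a t ih =>
    cases t with
    | nil => simp [hasAdjDup]
    | cons b t' =>
      have hpt : (b :: t').Pairwise (· ≤ ·) := (List.pairwise_cons.1 hs).2
      have hab : a ≤ b := (List.pairwise_cons.1 hs).1 b (by simp)
      have hale : ∀ x ∈ b :: t', a ≤ x := (List.pairwise_cons.1 hs).1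
      simp only [hasAdjDup, Bool.or_eq_false_iff, beq_eq_false_iff_ne, ih hpt,
        List.nodup_cons, List.mem_cons]
      constructor
      · rintro ⟨hne, hnd⟩
        refine ⟨?_, hnd⟩
        rintro (h | h)
        · exact hne h
        · -- a ∈ t' : then b ≤ a and a ≤ b give a = b
          have hba : b ≤ a := (List.pairwise_cons.1 hpt).1 a h
          exact hne (le_antisymm hab hba)
      · rintro ⟨hnotin, hnd⟩
        exact ⟨fun h => hnotin (Or.inl h), hnd⟩

-- A computes "YES"/"NO" by distinctness of the value list
lemma solve_eq_nodup (n : Int) (arr : List Int) :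
    solve n arr =
      if ((PySem.List.pyRange 0 (PySem.List.len arr) 1).map
            (fun i => i + PySem.List.pyGetD arr (PySem.Int.mod i n) 0)).Nodup
      then "YES" else "NO" := by
  unfold solve
  rw [solveGo_eq]
  have hvals : roomsOf n arr (PySem.List.enumerate arr) =
      (PySem.List.pyRange 0 (PySem.List.len arr) 1).map
        (fun i => i + PySem.List.pyGetD arr (PySem.Int.mod i n) 0) := by
    unfold roomsOf
    rw [PySem.List.enumerate_eq_map_pyRange (d := 0)]
    simp [List.map_map, Function.comp_def]
  rw [hvals]
  simp [PySem.Set.empty]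

-- ===== VERDICT (by name: the statement is the Claim_ definition above) =====
theorem solve_spec : Claim_equal_solve := by
  intro n arr _hdom _hpre
  unfold Spec_solve solve_alt
  rw [solve_eq_nodup]
  set vals := (PySem.List.pyRange 0 (PySem.List.len arr) 1).map
      (fun i => i + PySem.List.pyGetD arr (PySem.Int.mod i n) 0) with hvals
  have hperm : (PySem.List.sorted vals (fun x => x) false).Perm vals :=
    PySem.List.sorted_perm vals (fun x => x) false
  have hpw : (PySem.List.sorted vals (fun x => x) false).Pairwise (· ≤ ·) := by
    simpa using PySem.List.sorted_pairwise vals (fun x => x)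
  have hiff := hasAdjDup_eq_false_iff_nodup _ hpw
  rw [hperm.nodup_iff] at hiff
  by_cases hnd : vals.Nodup
  · rw [if_pos hnd, if_neg (by simp [hiff.2 hnd])]
  · rw [if_neg hnd]
    have : hasAdjDup (PySem.List.sorted vals (fun x => x) false) = true := by
      by_contra h
      exact hnd (hiff.1 (by simpa using h))
    rw [if_pos this]
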